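-- pv_equiv track=rewrite | github.com/jroivas/just-open | just-open.py | iterExtensions
-- ===== SOURCE A (Python) =====
-- def iterExtensions(fname):
--     """
--     >>> list(iterExtensions("test.tar.gz"))
--     ['tar.gz', 'gz']
--     >>> list(iterExtensions("a.b.c.d.e"))
--     ['b.c.d.e', 'c.d.e', 'd.e', 'e']
--     >>> list(iterExtensions("a..b"))
--     ['.b', 'b']
--     >>> list(iterExtensions("a"))
--     []
--     >>>
--     """
--     parts = fname.split('.')
--     partlen = len(parts)
--     if not parts or partlen == 1:
--         return None
--
--     i = 1
--     while i < partlen: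
--         yield '.'.join(parts[i:])
--         i += 1
--     return None
-- ===== SOURCE B (Python) =====
-- def iterExtensions(fname):
--     # Peel characters off the front; after each '.' the remaining suffix is an extension.
--     rest = fname
--     while rest:
--         ch, rest = rest[0], rest[1:]
--         if ch == '.':
--             yield rest
-- ===== Notes on version B (the rewrite author's own statement) =====
-- stated objective: simpler
-- what changed: B drops the split-into-parts list and the '.'.join of each tail entirely: it peels characters off the front of the string and, after consuming each '.', yields the remaining suffix directly.
import Mathlib
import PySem

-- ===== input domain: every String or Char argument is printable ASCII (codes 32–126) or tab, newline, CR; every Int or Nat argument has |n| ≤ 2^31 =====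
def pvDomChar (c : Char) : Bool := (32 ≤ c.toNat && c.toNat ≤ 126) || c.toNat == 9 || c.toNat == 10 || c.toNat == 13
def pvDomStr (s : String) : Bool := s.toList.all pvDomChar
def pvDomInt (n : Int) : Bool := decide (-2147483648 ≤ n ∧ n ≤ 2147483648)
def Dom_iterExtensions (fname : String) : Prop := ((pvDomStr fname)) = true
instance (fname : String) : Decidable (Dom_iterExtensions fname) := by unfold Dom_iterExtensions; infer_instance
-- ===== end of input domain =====

-- B: peel characters off the front, yielding the remaining suffix after each '.' — no split/join; same values as A (simpler, not claimed faster).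

-- ===== PORT A =====
-- fname.split('.'): sep "." is nonempty so Python never raises; computed exactly as PySem.Str.split? does for a non-empty separator.
def iterExtensions (fname : String) : List String :=
  let parts : List String := (PySem.Chars.splitOn fname.toList ['.']).map String.ofList
  let partlen := parts.length
  if parts.isEmpty || partlen == 1 then []
  else
    -- while i < partlen: yield '.'.join(parts[i:]); i += 1
    (PySem.List.pyRange 1 (partlen : Int) 1).map
      (fun i => PySem.Str.join "." (PySem.List.slice parts (some i) none))

-- ===== PORT B =====
-- the while loop of Source B: peel rest[0] off, yield the new rest after each '.'
def pvPeel : List Char → List (List Char)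
  | [] => []
  | c :: rest => if c = '.' then rest :: pvPeel rest else pvPeel rest

def iterExtensions_alt (fname : String) : List String :=
  (pvPeel fname.toList).map String.ofList

-- ===== PRECONDITION & SPEC =====
def Spec_iterExtensions (fname : String) (out : List String) : Prop := out = iterExtensions_alt fname
instance (fname : String) (out : List String) : Decidable (Spec_iterExtensions fname out) := by unfold Spec_iterExtensions; infer_instance

-- ===== CLAIM (what is proved, stated in full; the proofs are below) =====
def Claim_equal_iterExtensions : Prop := ∀ (fname : String), Dom_iterExtensions fname → Spec_iterExtensions fname (iterExtensions fname)

-- ===== LEMMAS AND PROOFS =====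

-- reference single-'.' splitter (proof-only helper)
def pvSp : List Char → List (List Char)
  | [] => [[]]
  | c :: r =>
    if c = '.' then [] :: pvSp r
    else match pvSp r with
      | [] => [[c]]
      | h :: t => (c :: h) :: t

lemma pvSp_ne_nil (cs : List Char) : pvSp cs ≠ [] := by
  cases cs with
  | nil => simp [pvSp]
  | cons c r =>
    simp only [pvSp]
    split
    · simp
    · cases pvSp r <;> simp

lemma pvGo_spec (fuel : Nat) (l cur : List Char) (acc : List (List Char))
    (h : l.length < fuel) :
    PySem.Chars.splitOn.go ['.'] fuel l cur acc =
      acc.reverse ++ (match pvSp l with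
        | [] => []
        | hd :: t => (cur.reverse ++ hd) :: t) := by
  induction fuel generalizing l cur acc with
  | zero => omega
  | succ f ih =>
    cases l with
    | nil =>
      simp only [PySem.Chars.splitOn.go, pvSp, List.reverse_cons]
      simp
    | cons c rest =>
      simp only [PySem.Chars.splitOn.go]
      by_cases hc : c = '.'
      · subst hc
        have hpre : List.isPrefixOf ['.'] ('.' :: rest) = true := by
          simp [List.isPrefixOf]
        rw [if_pos hpre]
        rw [ih (List.drop ['.'].length ('.' :: rest)) [] (cur.reverse :: acc)
              (by simp at h ⊢; omega)]
        simp only [List.length_cons, List.length_nil, List.drop_succ_cons, List.drop_zero,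
          List.reverse_cons, List.reverse_nil, List.nil_append, pvSp]
        cases hsp : pvSp rest with
        | nil => exact absurd hsp (pvSp_ne_nil rest)
        | cons hd t => simp
      · have hpre : List.isPrefixOf ['.'] (c :: rest) = false := by
          simp [List.isPrefixOf, Ne.symm hc]
        rw [if_neg (by simp [hpre])]
        rw [ih rest (c :: cur) acc (by simp at h ⊢; omega)]
        simp only [List.reverse_cons, pvSp, if_neg hc]
        cases hsp : pvSp rest with
        | nil => exact absurd hsp (pvSp_ne_nil rest)
        | cons hd t => simp

lemma splitOn_eq_pvSp (cs : List Char) :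
    PySem.Chars.splitOn cs ['.'] = pvSp cs := by
  unfold PySem.Chars.splitOn
  rw [pvGo_spec (cs.length + 1) cs [] [] (by omega)]
  cases hsp : pvSp cs with
  | nil => exact absurd hsp (pvSp_ne_nil cs)
  | cons hd t => simp

lemma join_pvSp (cs : List Char) :
    PySem.Chars.join ['.'] (pvSp cs) = cs := by
  induction cs with
  | nil => simp [pvSp, PySem.Chars.join, List.intercalate]
  | cons c r ih =>
    simp only [pvSp]
    by_cases hc : c = '.'
    · subst hc
      rw [if_pos rfl]
      cases hsp : pvSp r with
      | nil => exact absurd hsp (pvSp_ne_nil r)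
      | cons hd t =>
        rw [hsp] at ih
        simp only [PySem.Chars.join, List.intercalate] at ih ⊢
        simp [List.intersperse_cons₂, ih]
    · rw [if_neg hc]
      cases hsp : pvSp r with
      | nil => exact absurd hsp (pvSp_ne_nil r)
      | cons hd t =>
        rw [hsp] at ih
        cases t with
        | nil =>
          simp only [PySem.Chars.join, List.intercalate] at ih ⊢
          simp at ih ⊢
          exact ih
        | cons hd2 t2 =>
          simp only [PySem.Chars.join, List.intercalate, List.intersperse_cons₂,
            List.flatten_cons, List.nil_append,
            List.cons_append] at ih ⊢
          rw [ih]

-- the heart: suffix-joins of the split equal the peel loop's yields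
lemma suffix_joins_eq_pvPeel (cs : List Char) :
    (List.range ((pvSp cs).length - 1)).map
      (fun k => PySem.Chars.join ['.'] ((pvSp cs).drop (k + 1))) = pvPeel cs := by
  induction cs with
  | nil => simp [pvSp, pvPeel]
  | cons c r ih =>
    simp only [pvSp, pvPeel]
    by_cases hc : c = '.'
    · subst hc
      rw [if_pos rfl, if_pos rfl]
      cases hsp : pvSp r with
      | nil => exact absurd hsp (pvSp_ne_nil r)
      | cons hd t =>
        rw [hsp] at ih
        simp only [List.length_cons, Nat.add_sub_cancel, List.drop_succ_cons] at ih ⊢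
        rw [List.range_succ_eq_map]
        simp only [List.map_cons, List.map_map, List.drop_zero]
        refine congrArg₂ List.cons ?_ ?_
        · rw [← hsp, join_pvSp]
        · rw [← ih]
          apply List.map_congr_left
          intro k _
          simp [Nat.succ_eq_add_one]
    · rw [if_neg hc, if_neg hc]
      cases hsp : pvSp r with
      | nil => exact absurd hsp (pvSp_ne_nil r)
      | cons hd t =>
        rw [hsp] at ih
        simp only [List.length_cons, Nat.add_sub_cancel] at ih ⊢
        rw [← ih]
        apply List.map_congr_left
        intro k _
        simp

lemma toList_map_ofList (l : List (List Char)) :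
    (l.map String.ofList).map String.toList = l := by
  simp [List.map_map, Function.comp_def, String.toList_ofList]

-- ===== VERDICT (by name: the statement is the Claim_ definition above) =====
theorem iterExtensions_spec : Claim_equal_iterExtensions := by
  intro fname _
  unfold Spec_iterExtensions iterExtensions iterExtensions_alt
  simp only [splitOn_eq_pvSp]
  rw [← suffix_joins_eq_pvPeel fname.toList]
  set sp := pvSp fname.toList with hsp
  have hne : sp ≠ [] := pvSp_ne_nil fname.toList
  by_cases h1 : ((sp.map String.ofList).isEmpty || (sp.map String.ofList).length == 1) = true
  · rw [if_pos h1]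
    have : sp.length = 1 := by
      rcases Bool.or_eq_true_iff.mp h1 with h | h
      · exfalso; exact hne (by simpa [List.isEmpty_iff] using h)
      · simpa using Nat.eq_of_beq_eq_true (by simpa using h)
    rw [this]
    simp
  · rw [if_neg h1]
    have hlen : 2 ≤ sp.length := by
      rcases Nat.lt_or_ge sp.length 2 with h | h
      · interval_cases hl : sp.length
        · exact absurd (List.length_eq_zero_iff.mp hl) hne
        · exfalso; apply h1; simp [hl]
      · exact h
    rw [PySem.List.pyRange_one]
    simp only [List.map_map, List.length_map]
    have hcast : ((sp.length : Int) - 1).toNat = sp.length - 1 := by omega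
    rw [hcast]
    apply List.map_congr_left
    intro k hk
    simp only [Function.comp]
    rw [PySem.List.slice_from _ (by omega : (0:Int) ≤ 1 + (k:Int))]
    have : ((1 : Int) + k).toNat = k + 1 := by omega
    rw [this]
    simp only [PySem.Str.join]
    rw [← List.map_drop, toList_map_ofList]
    rfl
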